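-- pv_equiv track=rewrite | github.com/abdulreha/Agentic_RAG | src/node/reactnode.py | is_incomplete_answer
-- ===== SOURCE A (Python) =====
-- def is_incomplete_answer(answer: str) -> bool:
--     """
--     Determine if the answer is incomplete or indicates missing information
--     """
--     incomplete_indicators = [
--         "no information",
--         "not found",
--         "cannot find",
--         "not mentioned",
--         "not provided",
--         "not available",
--         "insufficient information",
--         "don't have enough",
--         "context doesn't contain",
--         "not in the documents",
--         "need more context",
--         "please provide",
--         "i need more",
--         "cannot answer",
--         "unable to answer"
--     ]
--
--     answer_lower = answer.lower()
--     return any(indicator in answer_lower for indicator in incomplete_indicators)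
-- ===== SOURCE B (Python) =====
-- _PHRASES = [
--     "no information",
--     "not found",
--     "cannot find",
--     "not mentioned",
--     "not provided",
--     "not available",
--     "insufficient information",
--     "don't have enough",
--     "context doesn't contain",
--     "not in the documents",
--     "need more context",
--     "please provide",
--     "i need more",
--     "cannot answer",
--     "unable to answer",
-- ]
--
--
-- def is_incomplete_answer(answer: str) -> bool:
--     """
--     Determine if the answer is incomplete or indicates missing information
--     """
--     # One left-to-right pass: simulate all partial matches simultaneously.
--     # 'active' holds the still-unmatched suffix of every phrase currently in
--     # progress; each character advances them and starts fresh attempts.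
--     active = []
--     for ch in answer.lower():
--         active = [p[1:] for p in active + _PHRASES if p and p[0] == ch]
--         if "" in active:
--             return True
--     return False
-- ===== Notes on version B (the rewrite author's own statement) =====
-- stated objective: alternative
-- what changed: Replaces the per-phrase membership loop (a separate substring search over the whole answer for each of the 15 indicators) with a single left-to-right pass that simulates all partial matches at once: an accumulator of still-unmatched phrase suffixes is advanced character by character (NFA-style multi-pattern matching), returning True as soon as any suffix is exhausted.
import Mathlib
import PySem

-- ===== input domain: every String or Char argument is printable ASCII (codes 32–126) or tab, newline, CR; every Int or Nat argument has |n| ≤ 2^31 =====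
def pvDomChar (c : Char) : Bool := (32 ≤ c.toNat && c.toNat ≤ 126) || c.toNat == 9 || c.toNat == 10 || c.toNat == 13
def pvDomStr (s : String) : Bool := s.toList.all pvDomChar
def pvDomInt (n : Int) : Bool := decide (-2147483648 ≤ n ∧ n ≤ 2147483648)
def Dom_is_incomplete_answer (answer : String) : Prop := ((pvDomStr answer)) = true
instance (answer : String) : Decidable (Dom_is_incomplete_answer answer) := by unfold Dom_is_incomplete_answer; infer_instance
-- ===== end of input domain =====

-- B replaces the per-phrase substring-search loop with a single left-to-right pass that
-- advances all partial matches simultaneously (multi-pattern NFA simulation); alternative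
-- decomposition, same result proved equal.


-- ===== PORT A =====
def aIndicators : List String :=
  ["no information", "not found", "cannot find", "not mentioned", "not provided",
   "not available", "insufficient information", "don't have enough",
   "context doesn't contain", "not in the documents", "need more context",
   "please provide", "i need more", "cannot answer", "unable to answer"]

-- any(indicator in answer_lower for indicator in incomplete_indicators)
def is_incomplete_answer (answer : String) : Bool :=
  let answer_lower := PySem.Str.lower answer
  aIndicators.any (fun indicator => PySem.Str.isIn indicator answer_lower)

-- ===== PORT B =====
-- the module-level _PHRASES list, as lists of characters (B manipulates suffixes)
def bPhrases : List (List Char) :=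
  (["no information", "not found", "cannot find", "not mentioned", "not provided",
    "not available", "insufficient information", "don't have enough",
    "context doesn't contain", "not in the documents", "need more context",
    "please provide", "i need more", "cannot answer", "unable to answer"]).map String.toList

-- active = [p[1:] for p in active + _PHRASES if p and p[0] == ch]
def bStep (ch : Char) (cand : List (List Char)) : List (List Char) :=
  cand.filterMap (fun p => match p with
    | [] => none
    | d :: ds => if d = ch then some ds else none)

-- the for-loop over answer.lower() with the 'active' accumulator and early return
def bScan (active : List (List Char)) : List Char → Bool
  | [] => false
  | ch :: rest =>
      let next := bStep ch (active ++ bPhrases)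
      if next.contains ([] : List Char) then true else bScan next rest

def is_incomplete_answer_alt (answer : String) : Bool :=
  bScan [] (PySem.Str.lower answer).toList

-- ===== PRECONDITION & SPEC =====
def Spec_is_incomplete_answer (answer : String) (out : Bool) : Prop := out = is_incomplete_answer_alt answer
instance (answer : String) (out : Bool) : Decidable (Spec_is_incomplete_answer answer out) := by unfold Spec_is_incomplete_answer; infer_instance

-- ===== CLAIM (what is proved, stated in full; the proofs are below) =====
def Claim_equal_is_incomplete_answer : Prop := ∀ (answer : String), Dom_is_incomplete_answer answer → Spec_is_incomplete_answer answer (is_incomplete_answer answer)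

-- ===== LEMMAS AND PROOFS =====

-- membership in one advancing step
theorem mem_bStep (ch : Char) (cand : List (List Char)) (q : List Char) :
    q ∈ bStep ch cand ↔ ch :: q ∈ cand := by
  simp only [bStep, List.mem_filterMap]
  constructor
  · rintro ⟨p, hp, h⟩
    match p with
    | [] => simp at h
    | d :: ds =>
        by_cases hd : d = ch
        · simp [hd] at h; subst hd h; exact hp
        · simp [hd] at h
  · intro h
    exact ⟨ch :: q, h, by simp⟩

-- the scan succeeds iff some active suffix is a prefix of the rest,
-- or some (nonempty) phrase occurs as an infix of the rest
theorem bScan_iff (active : List (List Char)) (s : List Char) :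
    bScan active s = true ↔
      (∃ p ∈ active, p ≠ [] ∧ p <+: s) ∨ (∃ q ∈ bPhrases, q ≠ [] ∧ q <:+: s) := by
  induction s generalizing active with
  | nil =>
      simp only [bScan, Bool.false_eq_true, false_iff]
      rintro (⟨p, _, hne, hpre⟩ | ⟨q, _, hne, hinf⟩)
      · exact hne (List.prefix_nil.mp hpre)
      · exact hne (List.infix_nil.mp hinf)
  | cons ch rest ih =>
      simp only [bScan]
      by_cases hmatch : (bStep ch (active ++ bPhrases)).contains ([] : List Char)
      · simp only [hmatch, if_true, true_iff]
        have h0 : ([] : List Char) ∈ bStep ch (active ++ bPhrases) :=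
          List.contains_iff_mem.mp hmatch
        have : ch :: ([] : List Char) ∈ active ++ bPhrases := (mem_bStep _ _ _).mp h0
        rcases List.mem_append.mp this with h | h
        · exact Or.inl ⟨[ch], h, by simp, ⟨rest, rfl⟩⟩
        · exact Or.inr ⟨[ch], h, by simp, List.infix_iff_prefix_suffix.mpr ⟨ch :: rest, ⟨rest, rfl⟩, List.suffix_refl _⟩⟩
      · rw [Bool.not_eq_true] at hmatch
        rw [hmatch, if_neg (by simp), ih]
        have hnil : ∀ q : List Char, q ∈ active ++ bPhrases → ¬ (q = [ch]) := by
          intro q hq hq1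
          have := List.contains_iff_mem.mpr ((mem_bStep ch (active ++ bPhrases) []).mpr (hq1 ▸ hq))
          rw [hmatch] at this
          exact Bool.false_ne_true this
        constructor
        · rintro (⟨p, hp, hne, hpre⟩ | ⟨q, hq, hne, hinf⟩)
          · -- p ∈ next: p = tail of some (ch :: p) ∈ active ++ phrases
            have hmem : ch :: p ∈ active ++ bPhrases := (mem_bStep _ _ _).mp hp
            rcases List.mem_append.mp hmem with h | h
            · exact Or.inl ⟨ch :: p, h, by simp, List.cons_prefix_cons.mpr ⟨rfl, hpre⟩⟩
            · exact Or.inr ⟨ch :: p, h, by simp, List.infix_iff_prefix_suffix.mpr ⟨ch :: rest, List.cons_prefix_cons.mpr ⟨rfl, hpre⟩, List.suffix_refl _⟩⟩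
          · exact Or.inr ⟨q, hq, hne, hinf.trans (List.suffix_cons ch rest).isInfix⟩
        · rintro (⟨p, hp, hne, hpre⟩ | ⟨q, hq, hne, hinf⟩)
          · -- p ≠ [], p <+: ch :: rest, p ∈ active
            match p with
            | [] => exact absurd rfl hne
            | d :: ds =>
                have hd : d = ch ∧ ds <+: rest := by
                  rcases hpre with ⟨t, ht⟩
                  injection ht with h1 h2
                  exact ⟨h1, ⟨t, h2⟩⟩
                have hds : ds ≠ [] := by
                  intro h; subst h
                  exact hnil (d :: []) (List.mem_append_left _ hp) (by simp [hd.1])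
                exact Or.inl ⟨ds, (mem_bStep _ _ _).mpr
                  (List.mem_append_left _ (by rw [hd.1] at hp; exact hp)), hds, hd.2⟩
          · rcases List.infix_cons_iff.mp hinf with h | h
            · -- q is a prefix of ch :: rest
              match q with
              | [] => exact absurd rfl hne
              | d :: ds =>
                  have hd : d = ch ∧ ds <+: rest := by
                    rcases h with ⟨t, ht⟩
                    injection ht with h1 h2
                    exact ⟨h1, ⟨t, h2⟩⟩
                  have hds : ds ≠ [] := by
                    intro hh; subst hh
                    exact hnil (d :: []) (List.mem_append_right _ hq) (by simp [hd.1])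
                  exact Or.inl ⟨ds, (mem_bStep _ _ _).mpr
                    (List.mem_append_right _ (by rw [hd.1] at hq; exact hq)), hds, hd.2⟩
            · exact Or.inr ⟨q, hq, hne, h⟩

theorem bPhrases_ne_nil : ∀ q ∈ bPhrases, q ≠ [] := by decide

-- ===== VERDICT (by name: the statement is the Claim_ definition above) =====
theorem is_incomplete_answer_spec : Claim_equal_is_incomplete_answer := by
  intro answer _
  unfold Spec_is_incomplete_answer
  rw [Bool.eq_iff_iff]
  simp only [is_incomplete_answer, is_incomplete_answer_alt, bScan_iff,
    List.any_eq_true, PySem.Str.isIn_iff_infix]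
  constructor
  · rintro ⟨ind, hind, hinf⟩
    refine Or.inr ⟨ind.toList, ?_, ?_, hinf⟩
    · simp only [bPhrases, List.mem_map]
      exact ⟨ind, hind, rfl⟩
    · exact bPhrases_ne_nil _ (by simp only [bPhrases, List.mem_map]; exact ⟨ind, hind, rfl⟩)
  · rintro (⟨p, hp, _, _⟩ | ⟨q, hq, _, hinf⟩)
    · simp at hp
    · simp only [bPhrases, List.mem_map] at hq
      rcases hq with ⟨ind, hind, rfl⟩
      exact ⟨ind, hind, hinf⟩
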